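-- pv_equiv track=rewrite | github.com/agentplug/research-agent | research_agent/core/analysis/tool_aware_analyzer.py | _needs_calculations
-- ===== SOURCE A (Python) =====
-- def _needs_calculations(query: str, summary: str) -> bool:
--     """Check if research needs calculations."""
--     calc_keywords = [
--         "calculate",
--         "compute",
--         "math",
--         "statistics",
--         "percentage",
--         "ratio",
--         "formula",
--         "equation",
--         "sum",
--         "average",
--         "total",
--         "rate",
--     ]
--
--     query_lower = query.lower()
--     summary_lower = summary.lower()
--
--     return any(
--         keyword in query_lower or keyword in summary_lower
--         for keyword in calc_keywords
--     )
-- ===== SOURCE B (Python) =====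
-- def _needs_calculations(query: str, summary: str) -> bool:
--     """Check if research needs calculations."""
--     calc_keywords = [
--         "calculate",
--         "compute",
--         "math",
--         "statistics",
--         "percentage",
--         "ratio",
--         "formula",
--         "equation",
--         "sum",
--         "average",
--         "total",
--         "rate",
--     ]
--
--     def has_calc_keyword(text):
--         t = text.lower()
--         for i in range(len(t)):
--             for kw in calc_keywords:
--                 if t.startswith(kw, i):
--                     return True
--         return False
--
--     return has_calc_keyword(query) or has_calc_keyword(summary)
-- ===== Notes on version B (the rewrite author's own statement) =====
-- stated objective: alternative
-- what changed: Replaced the keyword-driven any()-with-substring-`in` scan by a text-driven scan: walk each lowercased text position by position and test whether any keyword starts at that position (a naive multi-pattern matcher), short-circuiting at the first hit.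
import Mathlib
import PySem

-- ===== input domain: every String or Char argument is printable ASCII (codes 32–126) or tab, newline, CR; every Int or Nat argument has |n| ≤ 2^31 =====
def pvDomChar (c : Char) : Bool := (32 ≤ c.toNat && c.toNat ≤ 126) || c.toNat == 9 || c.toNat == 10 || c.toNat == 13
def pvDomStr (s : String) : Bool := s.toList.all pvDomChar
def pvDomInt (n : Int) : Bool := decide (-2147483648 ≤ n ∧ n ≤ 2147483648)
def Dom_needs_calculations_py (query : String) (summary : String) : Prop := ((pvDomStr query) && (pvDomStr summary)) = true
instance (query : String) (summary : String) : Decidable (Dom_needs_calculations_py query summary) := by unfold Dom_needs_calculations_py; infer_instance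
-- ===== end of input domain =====

-- B replaces A's keyword-driven substring scan by a text-driven position scan (naive multi-pattern matcher); alternative, same cost.


-- the shared keyword list
def calcKeywords : List String :=
  ["calculate", "compute", "math", "statistics", "percentage", "ratio",
   "formula", "equation", "sum", "average", "total", "rate"]

-- ===== PORT A =====
def needs_calculations_py (query : String) (summary : String) : Bool :=
  let query_lower := PySem.Str.lower query
  let summary_lower := PySem.Str.lower summary
  calcKeywords.any (fun keyword =>
    PySem.Str.isIn keyword query_lower || PySem.Str.isIn keyword summary_lower)

-- ===== PORT B =====
-- t.startswith(kw, i) with 0 ≤ i ≤ len(t) is exactly "kw is a prefix of t[i:]": ported as startswith on (t.drop i)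
def hasCalcKeyword (text : String) : Bool :=
  let t := (PySem.Str.lower text).toList
  (List.range t.length).any (fun i =>
    calcKeywords.any (fun kw => PySem.Chars.startswith (t.drop i) kw.toList))

def needs_calculations_py_alt (query : String) (summary : String) : Bool :=
  hasCalcKeyword query || hasCalcKeyword summary

-- ===== PRECONDITION & SPEC =====
def Spec_needs_calculations_py (query : String) (summary : String) (out : Bool) : Prop := out = needs_calculations_py_alt query summary
instance (query : String) (summary : String) (out : Bool) : Decidable (Spec_needs_calculations_py query summary out) := by unfold Spec_needs_calculations_py; infer_instance

-- ===== CLAIM (what is proved, stated in full; the proofs are below) =====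
def Claim_equal_needs_calculations_py : Prop := ∀ (query : String) (summary : String), Dom_needs_calculations_py query summary → Spec_needs_calculations_py query summary (needs_calculations_py query summary)

-- ===== LEMMAS AND PROOFS =====

theorem calcKeywords_ne_nil : ∀ kw ∈ calcKeywords, kw.toList ≠ [] := by decide

-- the position scan over one text equals the keyword-driven "kw in t" scan
theorem hasCalcKeyword_eq (text : String) :
    hasCalcKeyword text
      = calcKeywords.any (fun kw => PySem.Chars.isIn kw.toList (PySem.Str.lower text).toList) := by
  unfold hasCalcKeyword
  apply Bool.eq_iff_iff.mpr
  simp only [List.any_eq_true, List.mem_range, PySem.Chars.startswith_iff,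
    ← PySem.Chars.exists_prefix_drop_iff_isIn]
  constructor
  · rintro ⟨i, _, kw, hkw, hp⟩
    exact ⟨kw, hkw, i, hp⟩
  · rintro ⟨kw, hkw, j, hp⟩
    by_cases hj : j < (PySem.Str.lower text).toList.length
    · exact ⟨j, hj, kw, hkw, hp⟩
    · exfalso
      apply calcKeywords_ne_nil kw hkw
      have hdrop : (PySem.Str.lower text).toList.drop j = [] :=
        List.drop_eq_nil_of_le (le_of_not_gt hj)
      rw [hdrop] at hp
      exact List.prefix_nil.mp hp

-- ===== VERDICT (by name: the statement is the Claim_ definition above) =====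
theorem needs_calculations_py_spec : Claim_equal_needs_calculations_py := by
  intro query summary _
  show needs_calculations_py query summary = needs_calculations_py_alt query summary
  simp only [needs_calculations_py, needs_calculations_py_alt]
  rw [hasCalcKeyword_eq, hasCalcKeyword_eq]
  simp only [PySem.Str.isIn_eq]
  apply Bool.eq_iff_iff.mpr
  simp only [Bool.or_eq_true, List.any_eq_true]
  constructor
  · rintro ⟨x, hx, h | h⟩
    exacts [Or.inl ⟨x, hx, h⟩, Or.inr ⟨x, hx, h⟩]
  · rintro (⟨x, hx, h⟩ | ⟨x, hx, h⟩)
    exacts [⟨x, hx, Or.inl h⟩, ⟨x, hx, Or.inr h⟩]
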